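-- pv_equiv track=rewrite | github.com/TheBestInternEverOnTBS/Ngram-application | ngrams.py | create_unique_ngram_table
-- ===== SOURCE A (Python) =====
-- from collections import Counter
--
-- def create_unique_ngram_table(ngrams_1, ngrams_2, top_n=10):
--     unique_1 = Counter({ngram: ngrams_1[ngram] for ngram in ngrams_1 if ngram not in ngrams_2})
--     unique_2 = Counter({ngram: ngrams_2[ngram] for ngram in ngrams_2 if ngram not in ngrams_1})
--
--     # Take the top 'top_n' from each unique Counter
--     top_unique_ngrams = (unique_1 + unique_2).most_common(top_n)
--
--     # We create a list of ngrams with frequency in URL1 if it's unique to URL1 otherwise 0 and vice versa.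
--     unique_ngrams = [(ngram, unique_1[ngram] if ngram in unique_1 else 0, unique_2[ngram] if ngram in unique_2 else 0) for ngram, _ in top_unique_ngrams]
--
--     # Sort based on the sum of frequencies
--     unique_ngrams.sort(key=lambda x: x[1] + x[2], reverse=True)
--
--     # Convert to a structured format for plotting
--     words, freqs_1, freqs_2 = zip(*unique_ngrams)
--     return words, freqs_1, freqs_2
-- ===== SOURCE B (Python) =====
-- def create_unique_ngram_table(ngrams_1, ngrams_2, top_n=10):
--     rows = [(g, c, 0) for g, c in ngrams_1.items() if g not in ngrams_2 and c > 0]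
--     rows += [(g, 0, c) for g, c in ngrams_2.items() if g not in ngrams_1 and c > 0]
--     rows.sort(key=lambda t: t[1] + t[2], reverse=True)
--     top = rows[:top_n]
--     words, freqs_1, freqs_2 = zip(*top)
--     return words, freqs_1, freqs_2
-- ===== Notes on version B (the rewrite author's own statement) =====
-- stated objective: simpler
-- what changed: B builds the disjoint (ngram, freq1, freq2) triples directly in one pass over each dict and sorts once by the frequency sum, replacing A's two Counters, Counter addition, most_common's internal sort, the lookup-based triple reconstruction and the second sort.
import Mathlib
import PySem

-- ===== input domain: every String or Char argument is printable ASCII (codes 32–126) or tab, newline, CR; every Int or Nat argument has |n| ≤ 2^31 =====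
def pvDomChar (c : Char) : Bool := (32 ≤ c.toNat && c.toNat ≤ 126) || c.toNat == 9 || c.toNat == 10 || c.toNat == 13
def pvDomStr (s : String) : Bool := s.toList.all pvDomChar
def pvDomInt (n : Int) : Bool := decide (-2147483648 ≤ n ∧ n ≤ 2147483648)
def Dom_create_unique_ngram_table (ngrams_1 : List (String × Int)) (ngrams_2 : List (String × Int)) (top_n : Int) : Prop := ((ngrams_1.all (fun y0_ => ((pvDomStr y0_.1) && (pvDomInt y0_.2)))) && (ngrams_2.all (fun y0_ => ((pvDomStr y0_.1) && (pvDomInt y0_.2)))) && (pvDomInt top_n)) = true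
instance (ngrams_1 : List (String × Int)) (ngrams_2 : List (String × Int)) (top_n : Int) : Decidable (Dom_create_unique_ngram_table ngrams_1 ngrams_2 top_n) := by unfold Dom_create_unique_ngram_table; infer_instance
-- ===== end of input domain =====

-- B builds the (ngram, freq1, freq2) triples in one pass and sorts once; equal return values proved on Pre_ (where A's zip-unpacking does not raise).

-- ===== PORT A =====
-- Literal port of A. The dict arguments are the association lists normalised as Python
-- dicts (PySem.Dict.ofList: first position, last value). Counter.most_common(n) is
-- ported as its documented meaning: stable sort by count descending, [] for n < 0,
-- prefix of length n otherwise. The final 'zip(*unique_ngrams)' raises ValueError on an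
-- empty list (excluded by Pre_); on nonempty lists it is the three projections.
def create_unique_ngram_table (ngrams_1 : List (String × Int)) (ngrams_2 : List (String × Int)) (top_n : Int) : List String × List Int × List Int :=
  let d1 := PySem.Dict.ofList ngrams_1
  let d2 := PySem.Dict.ofList ngrams_2
  -- unique_1 = Counter({ngram: ngrams_1[ngram] for ngram in ngrams_1 if ngram not in ngrams_2})
  let unique_1 : PySem.Dict String Int :=
    d1.items.foldl (fun u kv => if !d2.contains kv.1 then u.insert kv.1 kv.2 else u) PySem.Dict.empty
  let unique_2 : PySem.Dict String Int :=
    d2.items.foldl (fun u kv => if !d1.contains kv.1 then u.insert kv.1 kv.2 else u) PySem.Dict.empty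
  -- unique_1 + unique_2 (Counter.__add__: keep positive sums of self, then positive counts of other not in self)
  let r0 : PySem.Dict String Int :=
    unique_1.items.foldl (fun r kv =>
      if 0 < kv.2 + unique_2.getD kv.1 0 then r.insert kv.1 (kv.2 + unique_2.getD kv.1 0) else r) PySem.Dict.empty
  let combined : PySem.Dict String Int :=
    unique_2.items.foldl (fun r kv =>
      if !unique_1.contains kv.1 && decide (0 < kv.2) then r.insert kv.1 kv.2 else r) r0
  -- .most_common(top_n)
  let top_unique_ngrams :=
    if top_n < 0 then []
    else (PySem.List.sorted combined.items (fun kv => kv.2) true).take top_n.toNat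
  let unique_ngrams := top_unique_ngrams.map (fun kv =>
    (kv.1, if unique_1.contains kv.1 then unique_1.getD kv.1 0 else 0,
           if unique_2.contains kv.1 then unique_2.getD kv.1 0 else 0))
  let unique_ngrams := PySem.List.sorted unique_ngrams (fun t => t.2.1 + t.2.2) true
  (unique_ngrams.map (·.1), unique_ngrams.map (·.2.1), unique_ngrams.map (·.2.2))

-- ===== PORT B =====
def create_unique_ngram_table_alt (ngrams_1 : List (String × Int)) (ngrams_2 : List (String × Int)) (top_n : Int) : List String × List Int × List Int :=
  let d1 := PySem.Dict.ofList ngrams_1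
  let d2 := PySem.Dict.ofList ngrams_2
  let rows := (d1.items.filter (fun kv => !d2.contains kv.1 && decide (0 < kv.2))).map (fun kv => (kv.1, kv.2, (0:Int)))
           ++ (d2.items.filter (fun kv => !d1.contains kv.1 && decide (0 < kv.2))).map (fun kv => (kv.1, (0:Int), kv.2))
  let rows := PySem.List.sorted rows (fun t => t.2.1 + t.2.2) true
  let top := PySem.List.slice rows none (some top_n)
  (top.map (·.1), top.map (·.2.1), top.map (·.2.2))

-- ===== PRECONDITION & SPEC =====
-- Pre_ excludes exactly the inputs on which A raises ValueError (zip-unpacking an empty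
-- table): top_n ≤ 0, or neither dict holds a key absent from the other with positive count.
def Pre_create_unique_ngram_table (ngrams_1 : List (String × Int)) (ngrams_2 : List (String × Int)) (top_n : Int) : Prop :=
  0 < top_n ∧
  (((PySem.Dict.ofList ngrams_1).items.any (fun kv => !(PySem.Dict.ofList ngrams_2).contains kv.1 && decide (0 < kv.2))
    || (PySem.Dict.ofList ngrams_2).items.any (fun kv => !(PySem.Dict.ofList ngrams_1).contains kv.1 && decide (0 < kv.2))) = true)
instance (ngrams_1 : List (String × Int)) (ngrams_2 : List (String × Int)) (top_n : Int) : Decidable (Pre_create_unique_ngram_table ngrams_1 ngrams_2 top_n) := by unfold Pre_create_unique_ngram_table; infer_instance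

def pvWitness_create_unique_ngram_table : (List (String × Int)) × (List (String × Int)) × Int := ([("a", 3)], [("b", 2)], 10)

def Spec_create_unique_ngram_table (ngrams_1 : List (String × Int)) (ngrams_2 : List (String × Int)) (top_n : Int) (out : List String × List Int × List Int) : Prop := out = create_unique_ngram_table_alt ngrams_1 ngrams_2 top_n
instance (ngrams_1 : List (String × Int)) (ngrams_2 : List (String × Int)) (top_n : Int) (out : List String × List Int × List Int) : Decidable (Spec_create_unique_ngram_table ngrams_1 ngrams_2 top_n out) := by unfold Spec_create_unique_ngram_table; infer_instance

-- ===== CLAIM (what is proved, stated in full; the proofs are below) =====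
def Claim_equal_create_unique_ngram_table : Prop := ∀ (ngrams_1 : List (String × Int)) (ngrams_2 : List (String × Int)) (top_n : Int), Dom_create_unique_ngram_table ngrams_1 ngrams_2 top_n → Pre_create_unique_ngram_table ngrams_1 ngrams_2 top_n → Spec_create_unique_ngram_table ngrams_1 ngrams_2 top_n (create_unique_ngram_table ngrams_1 ngrams_2 top_n)

-- ===== LEMMAS AND PROOFS =====

-- insertBy commutes with a key-compatible map
lemma pv_insertBy_map {α β : Type} (F : α → β) (p : α → α → Bool) (q : β → β → Bool)
    (hpq : ∀ x y, q (F x) (F y) = p x y) (x : α) (l : List α) :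
    PySem.List.insertBy q (F x) (l.map F) = (PySem.List.insertBy p x l).map F := by
  induction l with
  | nil => rfl
  | cons y ys ih =>
      simp only [List.map_cons, PySem.List.insertBy, hpq]
      by_cases hp : p x y <;> simp [hp, ih]

-- the stable reverse sort commutes with a key-compatible map
lemma pv_sorted_rev_map {α β κ : Type} [LT κ] [DecidableLT κ] (F : α → β) (k : α → κ) (k' : β → κ)
    (h : ∀ x, k' (F x) = k x) (l : List α) :
    PySem.List.sorted (l.map F) k' true = (PySem.List.sorted l k true).map F := by
  rw [PySem.List.sorted_rev_eq_foldl_insertBy, PySem.List.sorted_rev_eq_foldl_insertBy]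
  suffices hgen : ∀ (l : List α) (acc : List α),
      (l.map F).foldl (fun a x => PySem.List.insertBy (fun a b => decide (k' b < k' a)) x a) (acc.map F)
        = (l.foldl (fun a x => PySem.List.insertBy (fun a b => decide (k b < k a)) x a) acc).map F by
    simpa using hgen l []
  intro l
  induction l with
  | nil => intro acc; rfl
  | cons x xs ih =>
      intro acc
      simp only [List.map_cons, List.foldl_cons]
      rw [pv_insertBy_map F (fun a b => decide (k b < k a)) (fun a b => decide (k' b < k' a))
            (by intro a b; simp [h]) x acc]
      exact ih _

-- items of the "keys of dA not in dB" comprehension dict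
lemma pv_uitems (dA dB : PySem.Dict String Int) (h : dA.keys.Nodup) :
    (dA.items.foldl (fun u kv => if !dB.contains kv.1 then u.insert kv.1 kv.2 else u) PySem.Dict.empty).items
      = dA.items.filter (fun kv => !dB.contains kv.1) := by
  rw [show (List.foldl (fun u kv => if !dB.contains kv.1 then u.insert kv.1 kv.2 else u) PySem.Dict.empty dA.items)
        = List.foldl (fun (u : PySem.Dict String Int) kv => u.insert kv.1 kv.2) PySem.Dict.empty
            (dA.items.filter (fun kv => !dB.contains kv.1))
      from PySem.List.foldl_if_eq_foldl_filter (fun kv => !dB.contains kv.1) (fun u kv => u.insert kv.1 kv.2) dA.items PySem.Dict.empty]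
  rw [show (List.foldl (fun (u : PySem.Dict String Int) kv => u.insert kv.1 kv.2) PySem.Dict.empty
            (dA.items.filter (fun kv => !dB.contains kv.1))).items
        = PySem.Dict.empty.items ++ (dA.items.filter (fun kv => !dB.contains kv.1)).map (fun (kv : String × Int) => (kv.1, kv.2))
      from PySem.Dict.items_foldl_insert_fresh _ (fun (kv : String × Int) => kv.1) (fun (kv : String × Int) => kv.2) _
        (fun a _ => PySem.Dict.contains_empty _)
        ((List.Sublist.map Prod.fst (List.filter_sublist)).nodup (by simpa [PySem.Dict.keys] using h))]
  simp [show (PySem.Dict.empty : PySem.Dict String Int).items = [] from rfl]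

lemma pv_not_contains (d : PySem.Dict String Int) (k : String) (hk : k ∉ d.keys) :
    d.contains k = false := by
  cases hc : d.contains k
  · rfl
  · exact absurd ((PySem.Dict.contains_iff_mem_keys d k).1 hc) hk

-- a "keep the positive counts" insert loop over fresh distinct keys appends the filtered list
lemma pv_additems (l : List (String × Int)) (r : PySem.Dict String Int)
    (hfresh : ∀ kv ∈ l.filter (fun kv => decide (0 < kv.2)), r.contains kv.1 = false)
    (hnod : ((l.filter (fun kv => decide (0 < kv.2))).map Prod.fst).Nodup) :
    (l.foldl (fun r kv => if 0 < kv.2 then r.insert kv.1 kv.2 else r) r).items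
      = r.items ++ l.filter (fun kv => decide (0 < kv.2)) := by
  rw [show (l.foldl (fun r kv => if 0 < kv.2 then r.insert kv.1 kv.2 else r) r)
        = List.foldl (fun (r : PySem.Dict String Int) kv => r.insert kv.1 kv.2) r
            (l.filter (fun kv => decide (0 < kv.2)))
      from PySem.List.foldl_ite_eq_foldl_filter (fun kv => 0 < kv.2) (fun r kv => r.insert kv.1 kv.2) l r]
  rw [show (List.foldl (fun (r : PySem.Dict String Int) kv => r.insert kv.1 kv.2) r
            (l.filter (fun kv => decide (0 < kv.2)))).items
        = r.items ++ (l.filter (fun kv => decide (0 < kv.2))).map (fun (kv : String × Int) => (kv.1, kv.2))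
      from PySem.Dict.items_foldl_insert_fresh _ (fun (kv : String × Int) => kv.1) (fun (kv : String × Int) => kv.2) _
        hfresh hnod]
  simp

-- ===== VERDICT (by name: the statement is the Claim_ definition above) =====
theorem create_unique_ngram_table_spec : Claim_equal_create_unique_ngram_table := by
  intro ngrams_1 ngrams_2 top_n _hDom hPre
  obtain ⟨htop, -⟩ := hPre
  unfold Spec_create_unique_ngram_table
  unfold create_unique_ngram_table create_unique_ngram_table_alt
  simp only []
  set d1 := PySem.Dict.ofList ngrams_1 with hd1
  set d2 := PySem.Dict.ofList ngrams_2 with hd2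
  set u1 := d1.items.foldl (fun u kv => if !d2.contains kv.1 then u.insert kv.1 kv.2 else u) PySem.Dict.empty with hu1def
  set u2 := d2.items.foldl (fun u kv => if !d1.contains kv.1 then u.insert kv.1 kv.2 else u) PySem.Dict.empty with hu2def
  have hnd1 : d1.keys.Nodup := hd1 ▸ PySem.Dict.nodup_keys_ofList ngrams_1
  have hnd2 : d2.keys.Nodup := hd2 ▸ PySem.Dict.nodup_keys_ofList ngrams_2
  -- the comprehension dicts
  have hu1 : u1.items = d1.items.filter (fun kv => !d2.contains kv.1) := pv_uitems d1 d2 hnd1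
  have hu2 : u2.items = d2.items.filter (fun kv => !d1.contains kv.1) := pv_uitems d2 d1 hnd2
  have hu1k : u1.keys = (d1.items.filter (fun kv => !d2.contains kv.1)).map Prod.fst := by
    simp only [PySem.Dict.keys, hu1]
  have hu2k : u2.keys = (d2.items.filter (fun kv => !d1.contains kv.1)).map Prod.fst := by
    simp only [PySem.Dict.keys, hu2]
  -- membership facts
  have hL1d1 : ∀ kv ∈ d1.items.filter (fun kv => !d2.contains kv.1), kv.1 ∈ d1.keys := by
    intro kv hkv
    simp only [PySem.Dict.keys]
    exact List.mem_map_of_mem (List.mem_filter.1 hkv).1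
  have hL2nd1 : ∀ kv ∈ d2.items.filter (fun kv => !d1.contains kv.1), d1.contains kv.1 = false := by
    intro kv hkv
    simpa using (List.mem_filter.1 hkv).2
  have hL2d2 : ∀ kv ∈ d2.items.filter (fun kv => !d1.contains kv.1), kv.1 ∈ d2.keys := by
    intro kv hkv
    simp only [PySem.Dict.keys]
    exact List.mem_map_of_mem (List.mem_filter.1 hkv).1
  have hu2nc : ∀ kv ∈ d1.items.filter (fun kv => !d2.contains kv.1), u2.contains kv.1 = false := by
    intro kv hkv
    apply pv_not_contains
    rw [hu2k]
    intro hmem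
    obtain ⟨kv2, hkv2, hfst⟩ := List.mem_map.1 hmem
    have h1 := hL2nd1 kv2 hkv2
    rw [hfst] at h1
    rw [(PySem.Dict.contains_iff_mem_keys d1 kv.1).2 (hL1d1 kv hkv)] at h1
    exact Bool.true_eq_false.mp h1
  have hu1nc : ∀ kv ∈ d2.items.filter (fun kv => !d1.contains kv.1), u1.contains kv.1 = false := by
    intro kv hkv
    apply pv_not_contains
    rw [hu1k]
    intro hmem
    obtain ⟨kv1, hkv1, hfst⟩ := List.mem_map.1 hmem
    have h1 := hL2nd1 kv hkv
    rw [(PySem.Dict.contains_iff_mem_keys d1 kv.1).2 (hfst ▸ hL1d1 kv1 hkv1)] at h1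
    exact Bool.true_eq_false.mp h1
  -- the Counter sum
  set r0 := u1.items.foldl (fun r kv =>
      if 0 < kv.2 + u2.getD kv.1 0 then r.insert kv.1 (kv.2 + u2.getD kv.1 0) else r) PySem.Dict.empty with hr0def
  set combined := u2.items.foldl (fun r kv =>
      if !u1.contains kv.1 && decide (0 < kv.2) then r.insert kv.1 kv.2 else r) r0 with hcombdef
  set F1 := d1.items.filter (fun kv => !d2.contains kv.1 && decide (0 < kv.2)) with hF1def
  set F2 := d2.items.filter (fun kv => !d1.contains kv.1 && decide (0 < kv.2)) with hF2def
  have hF1alt : (d1.items.filter (fun kv => !d2.contains kv.1)).filter (fun kv => decide (0 < kv.2)) = F1 := by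
    rw [List.filter_filter, hF1def]
    exact List.filter_congr (fun kv _ => by rw [Bool.and_comm])
  have hF2alt : (d2.items.filter (fun kv => !d1.contains kv.1)).filter (fun kv => decide (0 < kv.2)) = F2 := by
    rw [List.filter_filter, hF2def]
    exact List.filter_congr (fun kv _ => by rw [Bool.and_comm])
  have hr0items : r0.items = F1 := by
    rw [hr0def, hu1,
        PySem.List.foldl_congr_mem _ _
          (fun (r : PySem.Dict String Int) kv => if 0 < kv.2 then r.insert kv.1 kv.2 else r) _
          (by intro acc kv hkv
              rw [PySem.Dict.getD_of_not_contains u2 0 (hu2nc kv hkv), add_zero]),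
        pv_additems _ _ (fun kv _ => PySem.Dict.contains_empty _)
          ((List.Sublist.map Prod.fst ((List.filter_sublist).trans (List.filter_sublist))).nodup
            (by simpa [PySem.Dict.keys] using hnd1))]
    rw [show (PySem.Dict.empty : PySem.Dict String Int).items = [] from rfl, List.nil_append]
    exact hF1alt
  have hcombitems : combined.items = F1 ++ F2 := by
    rw [hcombdef, hu2,
        PySem.List.foldl_congr_mem _ _
          (fun (r : PySem.Dict String Int) kv => if 0 < kv.2 then r.insert kv.1 kv.2 else r) _
          (by intro acc kv hkv
              simp [hu1nc kv hkv]),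
        pv_additems _ _ ?hfresh ?hnod, hr0items, hF2alt]
    case hfresh =>
      intro kv hkv
      have hkvL2 := List.mem_of_mem_filter (l := d2.items.filter (fun kv => !d1.contains kv.1)) hkv
      apply pv_not_contains
      simp only [PySem.Dict.keys, hr0items, hF1def]
      intro hmem
      obtain ⟨kv1, hkv1, hfst⟩ := List.mem_map.1 hmem
      have h1 := hL2nd1 kv hkvL2
      have h2 : kv1.1 ∈ d1.keys := by
        simp only [PySem.Dict.keys]
        exact List.mem_map_of_mem (List.mem_filter.1 hkv1).1
      rw [(PySem.Dict.contains_iff_mem_keys d1 kv.1).2 (hfst ▸ h2)] at h1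
      exact Bool.true_eq_false.mp h1
    case hnod =>
      exact (List.Sublist.map Prod.fst ((List.filter_sublist).trans (List.filter_sublist))).nodup
          (by simpa [PySem.Dict.keys] using hnd2)
  rw [if_neg (by omega : ¬ top_n < 0), hcombitems]
  set rows := F1.map (fun kv => (kv.1, kv.2, (0:Int))) ++ F2.map (fun kv => (kv.1, (0:Int), kv.2)) with hrowsdef
  set R := PySem.List.sorted rows (fun t => t.2.1 + t.2.2) true with hRdef
  have hpi : rows.map (fun t : String × Int × Int => (t.1, t.2.1 + t.2.2)) = F1 ++ F2 := by
    rw [hrowsdef]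
    simp [List.map_map, Function.comp_def]
  have hsort : PySem.List.sorted (F1 ++ F2) (fun kv => kv.2) true
      = R.map (fun t => (t.1, t.2.1 + t.2.2)) := by
    rw [← hpi, pv_sorted_rev_map (fun t : String × Int × Int => (t.1, t.2.1 + t.2.2))
          (fun t => t.2.1 + t.2.2) (fun kv => kv.2) (fun t => rfl) rows, hRdef]
  rw [hsort, ← List.map_take, List.map_map]
  rw [List.map_congr_left (g := id) ?hid, List.map_id]
  case hid =>
    intro t ht
    have htR : t ∈ R := List.mem_of_mem_take ht
    have htrows : t ∈ rows := by
      rw [hRdef] at htR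
      exact (PySem.List.mem_sorted _ _ _ _).1 htR
    simp only [Function.comp, id]
    rcases List.mem_append.1 htrows with h | h
    · obtain ⟨kv, hkv, rfl⟩ := List.mem_map.1 h
      have hkvL1 : kv ∈ d1.items.filter (fun kv => !d2.contains kv.1) := by
        rw [hF1def] at hkv
        have h1 := List.mem_filter.1 hkv
        refine List.mem_filter.2 ⟨h1.1, ?_⟩
        have := h1.2
        simp at this ⊢
        exact this.1
      have hc1 : u1.contains kv.1 = true :=
        (PySem.Dict.contains_iff_mem_keys u1 kv.1).2 (by rw [hu1k]; exact List.mem_map_of_mem hkvL1)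
      have hnu1 : u1.keys.Nodup := by
        rw [hu1k]
        exact (List.Sublist.map Prod.fst (List.filter_sublist)).nodup (by simpa [PySem.Dict.keys] using hnd1)
      have hg1 : u1.getD kv.1 0 = kv.2 :=
        PySem.Dict.getD_of_mem_items u1 (by rw [hu1]; simpa using hkvL1) hnu1 0
      have hc2 : u2.contains kv.1 = false := hu2nc kv hkvL1
      simp [hc1, hc2, hg1]
    · obtain ⟨kv, hkv, rfl⟩ := List.mem_map.1 h
      have hkvL2 : kv ∈ d2.items.filter (fun kv => !d1.contains kv.1) := by
        rw [hF2def] at hkv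
        have h1 := List.mem_filter.1 hkv
        refine List.mem_filter.2 ⟨h1.1, ?_⟩
        have := h1.2
        simp at this ⊢
        exact this.1
      have hc2 : u2.contains kv.1 = true :=
        (PySem.Dict.contains_iff_mem_keys u2 kv.1).2 (by rw [hu2k]; exact List.mem_map_of_mem hkvL2)
      have hnu2 : u2.keys.Nodup := by
        rw [hu2k]
        exact (List.Sublist.map Prod.fst (List.filter_sublist)).nodup (by simpa [PySem.Dict.keys] using hnd2)
      have hg2 : u2.getD kv.1 0 = kv.2 :=
        PySem.Dict.getD_of_mem_items u2 (by rw [hu2]; simpa using hkvL2) hnu2 0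
      have hc1 : u1.contains kv.1 = false := hu1nc kv hkvL2
      simp [hc1, hc2, hg2]
  rw [PySem.List.sorted_rev_eq_self_of_pairwise _ _
        (List.Pairwise.sublist (List.take_sublist _ _) (hRdef ▸ PySem.List.sorted_pairwise_rev rows _))]
  rw [show PySem.List.slice R none (some top_n) = R.take top_n.toNat by
        rw [show (top_n : Int) = ((top_n.toNat : ℕ) : ℤ) from (Int.toNat_of_nonneg htop.le).symm,
            PySem.List.slice_to_natCast]
        simp
        omega]
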